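-- pv_equiv track=rewrite | github.com/alertedsnake/asyncirc | asyncirc/parser.py | parse
-- ===== SOURCE A (Python) =====
-- def parse(input):
--     """Parse an IRC message.
--
--     >>> parse('@foo=bar :lol!lol@example.com PRIVMSG #lol :lol')
--     ({u'@foo': u'bar'}, u':lol!lol@example.com', u'PRIVMSG', [u'#lol', u':lol'])
--     """
--     if isinstance(input, bytes):
--         input = input.decode('UTF-8', 'replace')
--
--     string = input.split(' ')
--
--     if string[0].startswith('@'):
--         tag_str = string[0][1:]
--         string = string[1:]
--
--         tag_str = tag_str.split(',')
--         tags = {}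
--
--         for tag in tag_str:
--             k, v = tag.split('=', 1)
--             tags[k] = v
--     else:
--         tags = {}
--
--     if string[0].startswith(':'):
--         prefix = string[0][1:]
--         string = string[1:]
--     else:
--         prefix = ''
--
--     verb = string[0]
--     args = string[1:]
--
--     for arg in args:
--         if arg.startswith(':'):
--             idx  = args.index(arg)
--             arg  = ' '.join(args[idx:])
--             arg  = arg[1:]
--             args = args[:idx]
--
--             args.append(arg)
--
--             break
--
--     return (tags, prefix, verb, args)
-- ===== SOURCE B (Python) =====
-- def parse(input):
--     """Parse an IRC message (partition-based trailing-parameter split)."""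
--     if isinstance(input, bytes):
--         input = input.decode('UTF-8', 'replace')
--
--     string = input.split(' ')
--
--     tags = {}
--     if string[0].startswith('@'):
--         tags = dict(t.split('=', 1) for t in string[0][1:].split(','))
--         string = string[1:]
--
--     if string[0].startswith(':'):
--         prefix = string[0][1:]
--         string = string[1:]
--     else:
--         prefix = ''
--
--     head, sep, tail = ' '.join(string).partition(' :')
--     parts = head.split(' ')
--     args = parts[1:]
--     if sep:
--         args.append(tail)
--
--     return (tags, prefix, parts[0], args)
-- ===== Notes on version B (the rewrite author's own statement) =====
-- stated objective: alternative
-- what changed: The trailing-parameter loop (scan args for the first ':'-token, list.index, join/slice/append) is replaced by rejoining the remaining tokens and splitting the trailing parameter off in one shot with str.partition(' :'); tag and prefix handling is kept.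
-- outside the precondition, e.g. on parse(':'): A raises IndexError, B returns ({}, '', '', []); on parse('@'): A raises ValueError, B raises ValueError; on parse('@a=1 ::y'): A raises IndexError, B returns ({'a': '1'}, ':y', '', [])
import Mathlib
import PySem

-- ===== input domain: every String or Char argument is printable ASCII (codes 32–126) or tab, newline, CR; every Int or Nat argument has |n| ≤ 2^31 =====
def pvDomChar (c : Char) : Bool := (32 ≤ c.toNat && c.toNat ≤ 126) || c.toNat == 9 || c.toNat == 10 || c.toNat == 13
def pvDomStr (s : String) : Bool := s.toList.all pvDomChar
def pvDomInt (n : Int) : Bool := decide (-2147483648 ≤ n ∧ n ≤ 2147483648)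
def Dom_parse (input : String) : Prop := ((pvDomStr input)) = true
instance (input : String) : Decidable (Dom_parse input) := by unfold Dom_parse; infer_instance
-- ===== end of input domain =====

-- B replaces A's trailing-parameter scan (first ':'-token via list.index, join, slice) by
-- rejoining the remaining tokens and splitting once with str.partition(' :'); same value wherever A returns.

-- ===== PORT A =====

-- tag section: for k, v = tag.split('=', 1); tags[k] = v  (a tag without '=' raises ValueError
-- in Python: that input is excluded by Pre_parse, the '_' guard below only totalizes the port)
def parseTags (ts : List String) : PySem.Dict String String :=
  ts.foldl (fun d t =>
    match PySem.Str.splitMax? t "=" 1 with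
    | some [k, v] => d.insert k v
    | _ => d) PySem.Dict.empty

-- 'for arg in args: if arg.startswith(':'): idx = args.index(arg); …; break'
def parseLoopA (args : List String) : List String → List String
  | [] => args
  | arg :: rest =>
    if PySem.Str.startswith arg ":" then
      match PySem.List.index? args arg with
      | some idx =>
        PySem.List.slice args none (some (idx : Int)) ++
          [PySem.Str.slice (PySem.Str.join " " (PySem.List.slice args (some (idx : Int)) none)) (some 1) none]
      | none => args   -- unreachable: arg ∈ args
    else parseLoopA args rest

def parse (input : String) : (List (String × String)) × String × String × List String :=
  let string := (PySem.Str.split? input " ").getD []     -- input.split(' '); sep ≠ '' so always `some`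
  -- string[0] is written string.headD "": Python raises IndexError on the empty list,
  -- those inputs are excluded by Pre_parse
  let tags := if PySem.Str.startswith (string.headD "") "@" then
      parseTags ((PySem.Str.split? (PySem.Str.slice (string.headD "") (some 1) none) ",").getD [])
    else PySem.Dict.empty
  let string := if PySem.Str.startswith (string.headD "") "@" then string.tail else string
  let prefx := if PySem.Str.startswith (string.headD "") ":" then
      PySem.Str.slice (string.headD "") (some 1) none else ""
  let string := if PySem.Str.startswith (string.headD "") ":" then string.tail else string
  let verb := string.headD ""
  let args := string.tail
  (tags.items, prefx, verb, parseLoopA args args)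

-- ===== PORT B =====

def parse_alt (input : String) : (List (String × String)) × String × String × List String :=
  let string := (PySem.Str.split? input " ").getD []
  let tags := if PySem.Str.startswith (string.headD "") "@" then
      parseTags ((PySem.Str.split? (PySem.Str.slice (string.headD "") (some 1) none) ",").getD [])
    else PySem.Dict.empty
  let string := if PySem.Str.startswith (string.headD "") "@" then string.tail else string
  let prefx := if PySem.Str.startswith (string.headD "") ":" then
      PySem.Str.slice (string.headD "") (some 1) none else ""
  let string := if PySem.Str.startswith (string.headD "") ":" then string.tail else string
  -- head, sep, tail = ' '.join(string).partition(' :')  — partition ported exactly as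
  -- first-occurrence find plus the two slices around it
  let rest := PySem.Str.join " " string
  let i := PySem.Str.find rest " :"
  let head := if i = -1 then rest else PySem.Str.slice rest none (some i)
  let sep := if i = -1 then "" else " :"
  let tail := if i = -1 then "" else PySem.Str.slice rest (some (i + 2)) none
  let parts := (PySem.Str.split? head " ").getD []
  let args := if sep ≠ "" then parts.tail ++ [tail] else parts.tail
  (tags.items, prefx, parts.headD "", args)

-- ===== PRECONDITION & SPEC =====

-- Pre_parse excludes exactly the inputs on which Python A raises: a '@'-tag section containing a
-- tag without '=' (ValueError on unpacking), and a message that ends right after the tag section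
-- or right after a ':'-prefix token (IndexError on string[0]).
def Pre_parse (input : String) : Prop :=
  let toks := (PySem.Str.split? input " ").getD []
  let toks1 := if PySem.Str.startswith (toks.headD "") "@" then toks.tail else toks
  (PySem.Str.startswith (toks.headD "") "@" = true →
      toks.tail ≠ [] ∧
      ∀ t ∈ (PySem.Str.split? (PySem.Str.slice (toks.headD "") (some 1) none) ",").getD [],
        PySem.Str.isIn "=" t = true)
  ∧ (PySem.Str.startswith (toks1.headD "") ":" = true → toks1.tail ≠ [])

instance (input : String) : Decidable (Pre_parse input) := by unfold Pre_parse; infer_instance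

def pvWitness_parse : String := "@a=b :nick!u@h PRIVMSG #chan :hello world"

def Spec_parse (input : String) (out : (List (String × String)) × String × String × List String) : Prop := out = parse_alt input
instance (input : String) (out : (List (String × String)) × String × String × List String) : Decidable (Spec_parse input out) := by unfold Spec_parse; infer_instance

-- ===== CLAIM (what is proved, stated in full; the proofs are below) =====
def Claim_equal_parse : Prop := ∀ (input : String), Dom_parse input → Pre_parse input → Spec_parse input (parse input)

-- ===== LEMMAS AND PROOFS =====

-- spl l = l.split(' ') keeping empty pieces; the reference model of PySem.Chars.splitOn on sep = " "
def spl : List Char → List (List Char)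
  | [] => [[]]
  | c :: r => if c = ' ' then [] :: spl r else (c :: (spl r).headD []) :: (spl r).tail

theorem spl_ne_nil (l : List Char) : spl l ≠ [] := by
  cases l with
  | nil => simp [spl]
  | cons c r => by_cases h : c = ' ' <;> simp [spl, h]

theorem spl_cons_head_tail (l : List Char) : (spl l).head?.getD [] :: (spl l).tail = spl l := by
  have hne := spl_ne_nil l
  cases hs : spl l with
  | nil => exact absurd hs hne
  | cons a as => simp

theorem go_spec (fuel : Nat) (l cur : List Char) (acc : List (List Char)) (h : l.length ≤ fuel) :
    PySem.Chars.splitOn.go [' '] fuel l cur acc =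
      acc.reverse ++ (cur.reverse ++ (spl l).headD []) :: (spl l).tail := by
  induction fuel generalizing l cur acc with
  | zero =>
    interval_cases hl : l.length
    · rw [List.length_eq_zero_iff] at hl
      subst hl
      simp [PySem.Chars.splitOn.go, spl]
  | succ fuel ih =>
    cases l with
    | nil => simp [PySem.Chars.splitOn.go, spl]
    | cons c r =>
      by_cases hc : c = ' '
      · subst hc
        rw [show PySem.Chars.splitOn.go [' '] (fuel + 1) (' ' :: r) cur acc =
              PySem.Chars.splitOn.go [' '] fuel (List.drop 1 (' ' :: r)) [] (cur.reverse :: acc) from by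
            simp [PySem.Chars.splitOn.go, List.isPrefixOf]]
        rw [ih _ _ _ (by simpa using Nat.le_of_succ_le_succ (by simpa using h))]
        simp [spl]
        exact spl_cons_head_tail r
      · rw [show PySem.Chars.splitOn.go [' '] (fuel + 1) (c :: r) cur acc =
              PySem.Chars.splitOn.go [' '] fuel r (c :: cur) acc from by
            have h' : (' ' == c) = false := by simp [Ne.symm hc]
            simp [PySem.Chars.splitOn.go, List.isPrefixOf, h']]
        rw [ih _ _ _ (by simpa using Nat.le_of_succ_le_succ (by simpa using h))]
        simp [spl, hc]

theorem splitOn_space (l : List Char) : PySem.Chars.splitOn l [' '] = spl l := by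
  have := go_spec (l.length + 1) l [] [] (by omega)
  rw [PySem.Chars.splitOn, this]
  have hne := spl_ne_nil l
  cases hs : spl l with
  | nil => exact absurd hs hne
  | cons a as => simp

theorem spl_no_space (l : List Char) : ∀ t ∈ spl l, ' ' ∉ t := by
  induction l with
  | nil => simp [spl]
  | cons c r ih =>
    by_cases hc : c = ' '
    · simpa [spl, hc] using ih
    · intro t ht
      have hne := spl_ne_nil r
      cases hs : spl r with
      | nil => exact absurd hs hne
      | cons a as =>
        rw [spl, if_neg hc, hs] at ht
        simp at ht
        rcases ht with h1 | h2
        · subst h1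
          have ha := ih a (by rw [hs]; simp)
          simp only [List.mem_cons, not_or]
          exact ⟨fun h => hc h.symm, ha⟩
        · exact ih t (by rw [hs]; simp [h2])

theorem spl_append (t l : List Char) (ht : ' ' ∉ t) :
    spl (t ++ l) = (t ++ (spl l).headD []) :: (spl l).tail := by
  induction t with
  | nil =>
    have hne := spl_ne_nil l
    cases hs : spl l with
    | nil => exact absurd hs hne
    | cons a as => simp [hs]
  | cons c t ih =>
    have hc : c ≠ ' ' := by intro h; exact ht (by simp [h])
    have := ih (by intro h; exact ht (by simp [h]))
    simp only [List.cons_append, spl, if_neg hc, this]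
    simp

theorem join_cons (t : List Char) (ts : List (List Char)) (h : ts ≠ []) :
    PySem.Chars.join [' '] (t :: ts) = t ++ ' ' :: PySem.Chars.join [' '] ts := by
  cases ts with
  | nil => exact absurd rfl h
  | cons q rest => simpa using PySem.Chars.join_cons_cons [' '] t q rest

theorem spl_join (ts : List (List Char)) (h : ts ≠ []) (hns : ∀ t ∈ ts, ' ' ∉ t) :
    spl (PySem.Chars.join [' '] ts) = ts := by
  induction ts with
  | nil => exact absurd rfl h
  | cons t rest ih =>
    cases rest with
    | nil =>
      have := spl_append t [] (hns t (by simp))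
      simpa [PySem.Chars.join_singleton, spl] using this
    | cons q r =>
      rw [join_cons t (q :: r) (by simp)]
      rw [spl_append t (' ' :: PySem.Chars.join [' '] (q :: r)) (hns t (by simp))]
      have ihr := ih (by simp) (fun x hx => hns x (by simp [hx]))
      have : spl (' ' :: PySem.Chars.join [' '] (q :: r)) = [] :: (q :: r) := by
        simp [spl, ihr]
      simp [this]

theorem join_append (xs ys : List (List Char)) (hx : xs ≠ []) (hy : ys ≠ []) :
    PySem.Chars.join [' '] (xs ++ ys) =
      PySem.Chars.join [' '] xs ++ ' ' :: PySem.Chars.join [' '] ys := by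
  induction xs with
  | nil => exact absurd rfl hx
  | cons t rest ih =>
    cases rest with
    | nil => simpa [PySem.Chars.join_singleton] using join_cons t ys hy
    | cons q r =>
      rw [List.cons_append, join_cons t ((q :: r) ++ ys) (by simp), join_cons t (q :: r) (by simp)]
      rw [ih (by simp)]
      simp

-- String-level corollaries
theorem split?_join_str (ts : List String) (h : ts ≠ []) (hns : ∀ t ∈ ts, ' ' ∉ t.toList) :
    PySem.Str.split? (PySem.Str.join " " ts) " " = some ts := by
  have hmap := PySem.Str.split?_map (PySem.Str.join " " ts) " "
  have hchars : PySem.Chars.split? (PySem.Str.join " " ts).toList " ".toList =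
      some (List.map String.toList ts) := by
    have h1 : (" " : String).toList = [' '] := rfl
    rw [h1, PySem.Chars.split?]
    simp only [List.isEmpty_cons, Bool.false_eq_true, if_false]
    rw [PySem.Str.toList_join]
    have h2 : (" " : String).toList = [' '] := rfl
    rw [h2, splitOn_space, spl_join (List.map String.toList ts) (by simpa using h)
      (by intro t htm; rcases List.mem_map.mp htm with ⟨u, hu, rfl⟩; exact hns u hu)]
  rw [hchars] at hmap
  cases hsp : PySem.Str.split? (PySem.Str.join " " ts) " " with
  | none => rw [hsp] at hmap; simp at hmap
  | some l =>
    rw [hsp] at hmap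
    simp only [Option.map_some, Option.some.injEq] at hmap
    have : l = ts := by
      apply List.map_injective_iff.mpr (fun a b hab => String.toList_inj.mp hab)
      exact hmap
    rw [this]

theorem split_no_space (input : String) :
    ∀ t ∈ (PySem.Str.split? input " ").getD [], ' ' ∉ t.toList := by
  intro t ht
  have hmap := PySem.Str.split?_map input " "
  have h1 : (" " : String).toList = [' '] := rfl
  rw [h1, PySem.Chars.split?] at hmap
  simp only [List.isEmpty_cons, Bool.false_eq_true, if_false] at hmap
  rw [splitOn_space] at hmap
  cases hsp : PySem.Str.split? input " " with
  | none => rw [hsp] at hmap; simp at hmap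
  | some l =>
    rw [hsp] at hmap
    simp only [Option.map_some, Option.some.injEq] at hmap
    rw [hsp] at ht
    simp only [Option.getD_some] at ht
    exact spl_no_space input.toList t.toList (by rw [← hmap]; exact List.mem_map_of_mem ht)

theorem split_ne_nil (input : String) : (PySem.Str.split? input " ").getD [] ≠ [] := by
  have hmap := PySem.Str.split?_map input " "
  have h1 : (" " : String).toList = [' '] := rfl
  rw [h1, PySem.Chars.split?] at hmap
  simp only [List.isEmpty_cons, Bool.false_eq_true, if_false] at hmap
  rw [splitOn_space] at hmap
  cases hsp : PySem.Str.split? input " " with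
  | none => rw [hsp] at hmap; simp at hmap
  | some l =>
    rw [hsp] at hmap
    simp only [Option.map_some, Option.some.injEq] at hmap
    intro hnil
    simp only [Option.getD_some] at hnil
    subst hnil
    simp at hmap
    exact spl_ne_nil input.toList hmap.symm.symm

-- occurrences of " :" by index
theorem prefix_pair (a b : Char) (l : List Char) :
    [a, b] <+: l ↔ (l[0]? = some a ∧ l[1]? = some b) := by
  cases l with
  | nil => simp
  | cons x r =>
    cases r with
    | nil => simp [List.cons_prefix_cons]
    | cons y r' =>
      simp [List.cons_prefix_cons, eq_comm]

theorem occ_drop (a b : Char) (l : List Char) (j : Nat) :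
    [a, b] <+: l.drop j ↔ (l[j]? = some a ∧ l[j + 1]? = some b) := by
  rw [prefix_pair]
  rw [List.getElem?_drop, List.getElem?_drop]
  simp

theorem find_none (s : List Char)
    (h : ∀ q : Nat, ¬ (s[q]? = some ' ' ∧ s[q + 1]? = some ':')) :
    PySem.Chars.find s [' ', ':'] = -1 := by
  rw [PySem.Chars.find_eq_neg_one_iff]
  intro hinf
  rcases hinf with ⟨u, v, huv⟩
  have : [' ', ':'] <+: s.drop u.length := by
    rw [← huv]
    simp
  rcases (occ_drop ' ' ':' s u.length).mp this with ⟨h1, h2⟩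
  exact h u.length ⟨h1, h2⟩

theorem find_eq_pos (s : List Char) (p : Nat)
    (h1 : s[p]? = some ' ' ∧ s[p + 1]? = some ':')
    (h2 : ∀ q < p, ¬ (s[q]? = some ' ' ∧ s[q + 1]? = some ':')) :
    PySem.Chars.find s [' ', ':'] = (p : Int) := by
  have hpre : [' ', ':'] <+: s.drop p := (occ_drop ' ' ':' s p).mpr h1
  have hinf : [' ', ':'] <:+: s := by
    rcases hpre with ⟨v, hv⟩
    exact ⟨s.take p, v, by rw [List.append_assoc, hv, List.take_append_drop]⟩
  have hne : PySem.Chars.find s [' ', ':'] ≠ -1 :=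
    (PySem.Chars.find_ne_neg_one_iff s [' ', ':']).mpr hinf
  have hge : 0 ≤ PySem.Chars.find s [' ', ':'] := by
    have := PySem.Chars.neg_one_le_find s [' ', ':']
    omega
  obtain ⟨hp1, hp2⟩ := PySem.Chars.find_spec hge
  set f := (PySem.Chars.find s [' ', ':']).toNat with hf
  have : f = p := by
    rcases Nat.lt_trichotomy f p with hlt | heq | hgt
    · exact absurd ((occ_drop ' ' ':' s f).mp hp1) (h2 f hlt)
    · exact heq
    · exact absurd hpre (hp2 p hgt)
  omega

theorem noOcc (ts : List (List Char)) (hns : ∀ t ∈ ts, ' ' ∉ t)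
    (hnc : ∀ t ∈ ts.tail, t[0]? ≠ some ':') :
    ∀ j : Nat, ¬ ((PySem.Chars.join [' '] ts)[j]? = some ' ' ∧ (PySem.Chars.join [' '] ts)[j + 1]? = some ':') := by
  induction ts with
  | nil => intro j h; simp [PySem.Chars.join, List.intercalate] at h
  | cons t rest ih =>
    cases rest with
    | nil =>
      intro j h
      rw [PySem.Chars.join_singleton] at h
      exact (hns t (by simp)) (List.mem_of_getElem? h.1)
    | cons q r =>
      intro j h
      rw [join_cons t (q :: r) (by simp)] at h
      obtain ⟨h1, h2⟩ := h
      rcases Nat.lt_trichotomy j t.length with hlt | heq | hgt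
      · rw [List.getElem?_append_left hlt] at h1
        exact (hns t (by simp)) (List.mem_of_getElem? h1)
      · subst heq
        rw [List.getElem?_append_right (by omega)] at h2
        have hq0 : (' ' :: PySem.Chars.join [' '] (q :: r))[t.length + 1 - t.length]? = some ':' := h2
        simp only [Nat.add_sub_cancel_left] at hq0
        have hq1 : (PySem.Chars.join [' '] (q :: r))[0]? = some ':' := by simpa using hq0
        cases q with
        | nil =>
          cases r with
          | nil => simp [PySem.Chars.join_singleton] at hq1
          | cons r0 rr =>
            rw [join_cons [] (r0 :: rr) (by simp)] at hq1
            simp at hq1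
        | cons c qrest =>
          have : (PySem.Chars.join [' '] ((c :: qrest) :: r))[0]? = some c := by
            cases r with
            | nil => simp [PySem.Chars.join_singleton]
            | cons r0 rr => rw [join_cons (c :: qrest) (r0 :: rr) (by simp)]; simp
          rw [this] at hq1
          exact (hnc (c :: qrest) (by simp)) (by simpa using hq1)
      · have hk : ∃ k : Nat, j = t.length + 1 + k := ⟨j - t.length - 1, by omega⟩
        rcases hk with ⟨k, rfl⟩
        rw [List.getElem?_append_right (by omega)] at h1
        rw [List.getElem?_append_right (by omega)] at h2
        have e1 : t.length + 1 + k - t.length = k + 1 := by omega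
        have e2 : t.length + 1 + k + 1 - t.length = k + 2 := by omega
        rw [e1] at h1; rw [e2] at h2
        simp only [List.getElem?_cons_succ] at h1 h2
        exact ih (fun x hx => hns x (by simp [hx])) (fun x hx => hnc x (List.mem_cons_of_mem q hx)) k ⟨h1, h2⟩

-- the canonical value of A's trailing-parameter loop
def splitArgsStr : List String → List String
  | [] => []
  | a :: rest =>
    if PySem.Str.startswith a ":" then
      [PySem.Str.slice (PySem.Str.join " " (a :: rest)) (some 1) none]
    else a :: splitArgsStr rest

theorem index?_first (pre rest : List String) (a : String) (hpre : ∀ t ∈ pre, t ≠ a) :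
    PySem.List.index? (pre ++ a :: rest) a = some pre.length := by
  induction pre with
  | nil => simpa using PySem.List.index?_cons_self a rest
  | cons x xs ih =>
    rw [List.cons_append, PySem.List.index?_cons_of_ne _ (hpre x (by simp)),
      ih (fun t ht => hpre t (by simp [ht]))]
    simp

theorem loopA_eq (rem pre : List String)
    (hpre : ∀ t ∈ pre, PySem.Str.startswith t ":" = false) :
    parseLoopA (pre ++ rem) rem = pre ++ splitArgsStr rem := by
  induction rem generalizing pre with
  | nil => simp [parseLoopA, splitArgsStr]
  | cons a rest ih =>
    by_cases ha : PySem.Str.startswith a ":"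
    · have hne : ∀ t ∈ pre, t ≠ a := fun t ht heq => by
        have hf := hpre t ht
        rw [heq, ha] at hf
        exact absurd hf (by simp)
      rw [parseLoopA, if_pos ha, index?_first pre rest a hne]
      simp only [PySem.List.slice_to_natCast, PySem.List.slice_from_natCast,
        List.take_left, List.drop_left]
      rw [splitArgsStr, if_pos ha]
    · rw [parseLoopA, if_neg ha]
      have : pre ++ a :: rest = (pre ++ [a]) ++ rest := by simp
      rw [this, ih (pre ++ [a]) (by intro t ht; rcases List.mem_append.mp ht with h | h
                                    · exact hpre t h
                                    · simp at h; rw [h]; simpa using ha)]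
      rw [splitArgsStr, if_neg ha]
      simp

theorem first_colon (l : List String) :
    (∀ t ∈ l, PySem.Str.startswith t ":" = false) ∨
      ∃ pre a post, l = pre ++ a :: post ∧ (∀ t ∈ pre, PySem.Str.startswith t ":" = false) ∧
        PySem.Str.startswith a ":" = true := by
  induction l with
  | nil => left; simp
  | cons x xs ih =>
    by_cases hx : PySem.Str.startswith x ":"
    · right; exact ⟨[], x, xs, by simp, by simp, hx⟩
    · rcases ih with hall | ⟨pre, a, post, hl, hpre, ha⟩
      · left
        intro t ht
        rcases List.mem_cons.mp ht with rfl | h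
        · simpa using hx
        · exact hall t h
      · right
        exact ⟨x :: pre, a, post, by rw [hl]; simp, by
          intro t ht
          rcases List.mem_cons.mp ht with rfl | h
          · simpa using hx
          · exact hpre t h, ha⟩

theorem splitArgs_all_false (l : List String) (h : ∀ t ∈ l, PySem.Str.startswith t ":" = false) :
    splitArgsStr l = l := by
  induction l with
  | nil => rfl
  | cons a rest ih =>
    rw [splitArgsStr, if_neg (by rw [h a (by simp)]; exact Bool.false_ne_true)]
    rw [ih (fun t ht => h t (by simp [ht]))]

theorem prefix_single (a : Char) (l : List Char) : [a] <+: l ↔ l[0]? = some a := by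
  cases l with
  | nil => simp
  | cons x r => simp [List.cons_prefix_cons, eq_comm]

theorem startswith_colon_iff (u : String) :
    PySem.Str.startswith u ":" = true ↔ u.toList[0]? = some ':' := by
  rw [PySem.Str.startswith_eq, PySem.Chars.startswith_iff]
  exact prefix_single ':' u.toList

theorem getElem?_zero_join (t : List Char) (rest : List (List Char)) (h : t ≠ []) :
    (PySem.Chars.join [' '] (t :: rest))[0]? = t[0]? := by
  cases rest with
  | nil => rw [PySem.Chars.join_singleton]
  | cons q r =>
    rw [join_cons t (q :: r) (by simp)]
    rw [List.getElem?_append_left (by cases t with | nil => exact absurd rfl h | cons c cs => simp)]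

theorem splitArgs_append (pre rem : List String)
    (hpre : ∀ t ∈ pre, PySem.Str.startswith t ":" = false) :
    splitArgsStr (pre ++ rem) = pre ++ splitArgsStr rem := by
  induction pre with
  | nil => simp
  | cons x xs ih =>
    rw [List.cons_append, splitArgsStr,
      if_neg (by rw [hpre x (by simp)]; exact Bool.false_ne_true)]
    rw [ih (fun t ht => hpre t (by simp [ht]))]
    simp

-- the heart: on a nonempty list of space-free tokens, A's verb/args equal B's partition-based ones
theorem final_eq (ts : List String) (hts : ts ≠ []) (hns : ∀ t ∈ ts, ' ' ∉ t.toList) :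
    (ts.headD "", parseLoopA ts.tail ts.tail) =
      (let rest := PySem.Str.join " " ts
       let i := PySem.Str.find rest " :"
       let head := if i = -1 then rest else PySem.Str.slice rest none (some i)
       let sep := if i = -1 then "" else " :"
       let tail := if i = -1 then "" else PySem.Str.slice rest (some (i + 2)) none
       let parts := (PySem.Str.split? head " ").getD []
       ((parts.headD "" : String), if sep ≠ "" then parts.tail ++ [tail] else parts.tail)) := by
  obtain ⟨hd, tl, rfl⟩ : ∃ hd tl, ts = hd :: tl := by
    cases ts with
    | nil => exact absurd rfl hts
    | cons a b => exact ⟨a, b, rfl⟩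
  have hrest : (PySem.Str.join " " (hd :: tl)).toList =
      PySem.Chars.join [' '] (List.map String.toList (hd :: tl)) := by
    rw [PySem.Str.toList_join]; rfl
  have hfind : PySem.Str.find (PySem.Str.join " " (hd :: tl)) " :" =
      PySem.Chars.find (PySem.Str.join " " (hd :: tl)).toList [' ', ':'] := by
    rw [PySem.Str.find_eq]; rfl
  have hnsm : ∀ t ∈ List.map String.toList (hd :: tl), ' ' ∉ t := by
    intro t htm
    rcases List.mem_map.mp htm with ⟨u, hu, rfl⟩
    exact hns u hu
  rcases first_colon tl with hall | ⟨pre, a, post, htl, hpre, ha⟩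
  · -- no ':'-token among the args: find = -1 and both sides keep the token list
    have hA : parseLoopA tl tl = tl := by
      have := loopA_eq tl [] (by simp)
      simpa [splitArgs_all_false tl hall] using this
    have hm1 : PySem.Chars.find (PySem.Str.join " " (hd :: tl)).toList [' ', ':'] = -1 := by
      rw [hrest]
      apply find_none
      apply noOcc _ hnsm
      intro t htm
      rcases List.mem_map.mp (by simpa using htm) with ⟨u, hu, rfl⟩
      intro hc
      have hcc := (startswith_colon_iff u).mpr hc
      rw [hall u hu] at hcc
      exact absurd hcc (by simp)
    have hm1' : PySem.Str.find (PySem.Str.join " " (hd :: tl)) " :" = -1 := by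
      rw [hfind]; exact hm1
    simp only [hm1', reduceIte]
    rw [split?_join_str (hd :: tl) (by simp) hns]
    simp [hA]
  · -- tl = pre ++ a :: post with a the first ':'-token
    subst htl
    have hA : parseLoopA (pre ++ a :: post) (pre ++ a :: post) =
        pre ++ [PySem.Str.slice (PySem.Str.join " " (a :: post)) (some 1) none] := by
      have := loopA_eq (pre ++ a :: post) [] (by simp)
      simp only [List.nil_append] at this
      rw [this, splitArgs_append pre (a :: post) hpre, splitArgsStr, if_pos ha]
    have hsplit : List.map String.toList (hd :: (pre ++ a :: post)) =
        List.map String.toList ((hd :: pre) ++ (a :: post)) := by simp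
    set s1 := PySem.Str.join " " (hd :: pre) with hs1
    set s2 := PySem.Str.join " " (a :: post) with hs2
    have hdecomp : (PySem.Str.join " " (hd :: (pre ++ a :: post))).toList =
        s1.toList ++ ' ' :: s2.toList := by
      rw [hrest, hsplit, List.map_append,
        join_append _ _ (by simp) (by simp)]
      rw [hs1, hs2, PySem.Str.toList_join, PySem.Str.toList_join]
      rfl
    set p := s1.toList.length with hp
    have hocc : (PySem.Str.join " " (hd :: (pre ++ a :: post))).toList[p]? = some ' ' ∧
        (PySem.Str.join " " (hd :: (pre ++ a :: post))).toList[p + 1]? = some ':' := by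
      constructor
      · rw [hdecomp, List.getElem?_append_right (by omega)]
        simp [hp]
      · rw [hdecomp, List.getElem?_append_right (by omega)]
        have : p + 1 - s1.toList.length = 1 := by omega
        rw [this]
        simp only [List.getElem?_cons_succ]
        rw [hs2, PySem.Str.toList_join]
        have : List.map String.toList (a :: post) = a.toList :: List.map String.toList post := rfl
        rw [show ((" " : String).toList) = [' '] from rfl, this,
          getElem?_zero_join a.toList _ (by
            intro hnil
            have := (startswith_colon_iff a).mp ha
            rw [hnil] at this
            simp at this)]
        exact (startswith_colon_iff a).mp ha
    have hmin : ∀ q < p, ¬ ((PySem.Str.join " " (hd :: (pre ++ a :: post))).toList[q]? = some ' ' ∧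
        (PySem.Str.join " " (hd :: (pre ++ a :: post))).toList[q + 1]? = some ':') := by
      intro q hq ⟨hq1, hq2⟩
      rcases Nat.lt_or_ge (q + 1) p with hlt | hge
      · rw [hdecomp, List.getElem?_append_left (by omega)] at hq1 hq2
        have hno := noOcc (List.map String.toList (hd :: pre))
          (by intro t htm
              rcases List.mem_map.mp htm with ⟨u, hu, rfl⟩
              rcases List.mem_cons.mp hu with rfl | h
              · exact hns u (by simp)
              · exact hns u (by simp [List.mem_append.mpr (Or.inl h)]))
          (by intro t htm
              rcases List.mem_map.mp (by simpa using htm) with ⟨u, hu, rfl⟩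
              intro hc
              have hcc := (startswith_colon_iff u).mpr hc
              rw [hpre u hu] at hcc
              exact absurd hcc (by simp)) q
        rw [hs1, PySem.Str.toList_join, show ((" " : String).toList) = [' '] from rfl] at hq1 hq2
        exact hno ⟨hq1, hq2⟩
      · have : q + 1 = p := by omega
        rw [hdecomp, this, List.getElem?_append_right (by omega)] at hq2
        rw [show p - s1.toList.length = 0 from by omega] at hq2
        simp at hq2
    have hfp : PySem.Str.find (PySem.Str.join " " (hd :: (pre ++ a :: post))) " :" = (p : Int) := by
      rw [hfind]
      exact find_eq_pos _ p hocc hmin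
    have hne1 : ((p : Int)) ≠ -1 := by omega
    simp only [hfp]
    rw [if_neg hne1, if_neg hne1, if_neg hne1]
    have hhead : PySem.Str.slice (PySem.Str.join " " (hd :: (pre ++ a :: post))) none (some (p : Int)) = s1 := by
      apply String.toList_inj.mp
      rw [PySem.Str.toList_slice, PySem.Chars.slice_eq_listSlice, PySem.List.slice_to_natCast,
        hdecomp, hp, List.take_left]
    have htail : PySem.Str.slice (PySem.Str.join " " (hd :: (pre ++ a :: post))) (some ((p : Int) + 2)) none =
        PySem.Str.slice s2 (some 1) none := by
      apply String.toList_inj.mp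
      rw [PySem.Str.toList_slice, PySem.Str.toList_slice, PySem.Chars.slice_eq_listSlice,
        PySem.Chars.slice_eq_listSlice, PySem.List.slice_from_one]
      rw [show ((p : Int) + 2) = ((p + 2 : Nat) : Int) from by push_cast; ring]
      rw [PySem.List.slice_from_natCast, hdecomp, List.drop_append]
      rw [show p + 2 - s1.toList.length = 2 from by omega]
      rw [List.drop_eq_nil_of_le (by omega : s1.toList.length ≤ p + 2)]
      rw [show (2 : Nat) = 1 + 1 from rfl, List.drop_succ_cons, List.drop_one]
      simp
    rw [hhead, htail]
    have hnshp : ∀ t ∈ hd :: pre, ' ' ∉ t.toList := by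
      intro t ht
      rcases List.mem_cons.mp ht with rfl | h
      · exact hns t (by simp)
      · exact hns t (by simp [List.mem_append.mpr (Or.inl h)])
    rw [split?_join_str (hd :: pre) (by simp) hnshp]
    simp only [Option.getD_some, List.headD_cons, List.tail_cons]
    rw [hA]
    simp

-- ===== VERDICT (by name: the statement is the Claim_ definition above) =====
theorem parse_spec : Claim_equal_parse := by
  intro input hdom hpre
  unfold Pre_parse at hpre
  obtain ⟨c1, c2⟩ := hpre
  show parse input = parse_alt input
  simp only [parse, parse_alt]
  set s0 := (PySem.Str.split? input " ").getD [] with hs0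
  set s1 := if PySem.Str.startswith (s0.headD "") "@" then s0.tail else s0 with hs1
  set s2 := if PySem.Str.startswith (s1.headD "") ":" then s1.tail else s1 with hs2
  have hne2 : s2 ≠ [] := by
    rw [hs2]
    split_ifs with hb2
    · exact c2 hb2
    · rw [hs1]
      split_ifs with hb1
      · exact (c1 hb1).1
      · exact split_ne_nil input
  have hm1 : ∀ t ∈ s1, t ∈ s0 := by
    rw [hs1]
    split_ifs
    · exact fun t ht => List.mem_of_mem_tail ht
    · exact fun t ht => ht
  have hm2 : ∀ t ∈ s2, t ∈ s0 := by
    rw [hs2]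
    split_ifs
    · exact fun t ht => hm1 t (List.mem_of_mem_tail ht)
    · exact hm1
  have hns2 : ∀ t ∈ s2, ' ' ∉ t.toList := fun t ht => split_no_space input t (hm2 t ht)
  have key := final_eq s2 hne2 hns2
  simp only [Prod.mk.injEq] at key ⊢
  exact ⟨trivial, trivial, key.1, key.2⟩
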